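-- pv_equiv track=rewrite | github.com/LunarBit-dev/Modrinth-Auto-Updater | update_modpack.py | get_compatible_loaders
-- ===== SOURCE A (Python) =====
-- from typing import List, Dict, Any, Tuple
--
-- def get_compatible_loaders(modpack_loaders: List[str]) -> set:
--     """
--     Get compatible mod loaders based on the modpack's loader.
--     Quilt is backward compatible with Fabric.
--     Other loaders are strict.
--     """
--     compatible = set()
--
--     for loader in modpack_loaders:
--         if 'quilt' in loader.lower():
--             # Quilt can use both Quilt and Fabric mods
--             compatible.update(['quilt', 'fabric'])
--         elif 'fabric' in loader.lower():
--             # Fabric only uses Fabric mods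
--             compatible.add('fabric')
--         elif 'forge' in loader.lower():
--             # Forge only uses Forge mods
--             compatible.add('forge')
--         elif 'neoforge' in loader.lower():
--             # NeoForge only uses NeoForge mods
--             compatible.add('neoforge')
--         else:
--             # For any other loader, use exact match
--             compatible.add(loader.lower())
--
--     return compatible
-- ===== SOURCE B (Python) =====
-- def _classify(loader):
--     """Pure map: one loader string -> the list of loaders it contributes."""
--     low = loader.lower()
--     if 'quilt' in low:
--         return ['quilt', 'fabric']
--     if 'fabric' in low:
--         return ['fabric']
--     if 'forge' in low:  # also covers 'neoforge' (it contains 'forge')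
--         return ['forge']
--     return [low]
--
-- def get_compatible_loaders(modpack_loaders):
--     return set(c for loader in modpack_loaders for c in _classify(loader))
-- ===== Notes on version B (the rewrite author's own statement) =====
-- stated objective: simpler
-- what changed: Replaces the imperative loop mutating a set with a pure per-loader classification function whose results are flattened and deduplicated once by a single set() comprehension, and drops A's unreachable neoforge branch (any string containing 'neoforge' contains 'forge').
import Mathlib
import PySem

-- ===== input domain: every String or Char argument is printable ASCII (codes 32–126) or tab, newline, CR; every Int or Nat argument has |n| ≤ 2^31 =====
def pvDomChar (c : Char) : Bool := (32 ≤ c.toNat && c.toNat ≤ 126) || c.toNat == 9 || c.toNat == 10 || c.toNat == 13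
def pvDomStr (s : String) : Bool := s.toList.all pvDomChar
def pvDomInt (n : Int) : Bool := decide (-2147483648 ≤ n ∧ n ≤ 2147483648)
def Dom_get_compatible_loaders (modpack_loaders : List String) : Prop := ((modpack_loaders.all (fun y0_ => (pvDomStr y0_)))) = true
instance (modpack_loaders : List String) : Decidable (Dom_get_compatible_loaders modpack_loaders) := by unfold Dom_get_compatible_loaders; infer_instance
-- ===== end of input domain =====

-- B replaces A's imperative loop mutating a set with a pure per-loader classification
-- (flatMap) deduplicated once at the end, dropping A's unreachable 'neoforge' branch.

-- ===== PORT A =====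
def get_compatible_loaders (modpack_loaders : List String) : List String :=
  modpack_loaders.foldl (fun compatible loader =>
    if PySem.Str.isIn "quilt" (PySem.Str.lower loader) then
      PySem.Set.update compatible ["quilt", "fabric"]
    else if PySem.Str.isIn "fabric" (PySem.Str.lower loader) then
      PySem.Set.add compatible "fabric"
    else if PySem.Str.isIn "forge" (PySem.Str.lower loader) then
      PySem.Set.add compatible "forge"
    else if PySem.Str.isIn "neoforge" (PySem.Str.lower loader) then
      PySem.Set.add compatible "neoforge"
    else
      PySem.Set.add compatible (PySem.Str.lower loader)) PySem.Set.empty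

-- ===== PORT B =====
def pvClassify (loader : String) : List String :=
  if PySem.Str.isIn "quilt" (PySem.Str.lower loader) then ["quilt", "fabric"]
  else if PySem.Str.isIn "fabric" (PySem.Str.lower loader) then ["fabric"]
  else if PySem.Str.isIn "forge" (PySem.Str.lower loader) then ["forge"]
  else [PySem.Str.lower loader]

def get_compatible_loaders_alt (modpack_loaders : List String) : List String :=
  PySem.Set.ofList (modpack_loaders.flatMap pvClassify)

-- ===== PRECONDITION & SPEC =====
def Spec_get_compatible_loaders (modpack_loaders : List String) (out : List String) : Prop := out = get_compatible_loaders_alt modpack_loaders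
instance (modpack_loaders : List String) (out : List String) : Decidable (Spec_get_compatible_loaders modpack_loaders out) := by unfold Spec_get_compatible_loaders; infer_instance

-- ===== CLAIM (what is proved, stated in full; the proofs are below) =====
def Claim_equal_get_compatible_loaders : Prop := ∀ (modpack_loaders : List String), Dom_get_compatible_loaders modpack_loaders → Spec_get_compatible_loaders modpack_loaders (get_compatible_loaders modpack_loaders)

-- ===== LEMMAS AND PROOFS =====

-- 'forge' occurs in any string containing 'neoforge'.
theorem pv_forge_of_neoforge (low : String) (h : PySem.Str.isIn "neoforge" low = true) :
    PySem.Str.isIn "forge" low = true := by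
  rw [PySem.Str.isIn_iff_infix] at h ⊢
  exact List.IsInfix.trans (by decide) h

-- A's per-element step equals updating the accumulator with B's classification list.
theorem pv_step_eq (s : PySem.Set String) (loader : String) :
    (if PySem.Str.isIn "quilt" (PySem.Str.lower loader) then
      PySem.Set.update s ["quilt", "fabric"]
    else if PySem.Str.isIn "fabric" (PySem.Str.lower loader) then
      PySem.Set.add s "fabric"
    else if PySem.Str.isIn "forge" (PySem.Str.lower loader) then
      PySem.Set.add s "forge"
    else if PySem.Str.isIn "neoforge" (PySem.Str.lower loader) then
      PySem.Set.add s "neoforge"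
    else
      PySem.Set.add s (PySem.Str.lower loader))
    = PySem.Set.update s (pvClassify loader) := by
  unfold pvClassify
  split_ifs with h1 h2 h3 h4
  · rfl
  · rfl
  · rfl
  · exact absurd (pv_forge_of_neoforge _ h4) h3
  · rfl

-- Folding updates over a list equals one update with the flattened classifications.
theorem pv_foldl_update (s : PySem.Set String) (ls : List String) :
    ls.foldl (fun acc l => PySem.Set.update acc (pvClassify l)) s
      = PySem.Set.update s (ls.flatMap pvClassify) := by
  induction ls generalizing s with
  | nil => rfl
  | cons l t ih =>
      simp only [List.foldl_cons, List.flatMap_cons, ih]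
      simp [PySem.Set.update, List.foldl_append]

-- ===== VERDICT (by name: the statement is the Claim_ definition above) =====
theorem get_compatible_loaders_spec : Claim_equal_get_compatible_loaders := by
  intro modpack_loaders _
  unfold Spec_get_compatible_loaders get_compatible_loaders get_compatible_loaders_alt
  simp only [pv_step_eq, pv_foldl_update]
  rw [← PySem.Set.update_nil_left]
  rfl
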